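-- pv_equiv track=rewrite | github.com/Timodur/Hibou-Server | src/modules/audio/localization/strategies/energy/strategy.py | _last_consecutive_true_run
-- ===== SOURCE A (Python) =====
-- def _last_consecutive_true_run(flags: list[bool]) -> tuple[int, int] | None:
--     """
--     Max contiguous subsequences where flags[i] is True.
--     Returns (start, end) inclusive indices of the last such run, or None if none.
--     """
--     n = len(flags)
--     runs: list[tuple[int, int]] = []
--     i = 0
--     while i < n:
--         if not flags[i]:
--             i += 1
--             continue
--         start = i
--         while i < n and flags[i]:
--             i += 1
--         runs.append((start, i - 1))
--     return runs[-1] if runs else None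
-- ===== SOURCE B (Python) =====
-- def _last_consecutive_true_run(flags: list[bool]) -> tuple[int, int] | None:
--     """Scan right-to-left: find the last True index (end), then keep
--     decrementing while True to find the run's start. No runs list."""
--     i = len(flags) - 1
--     while i >= 0 and not flags[i]:
--         i -= 1
--     if i < 0:
--         return None
--     end = i
--     while i >= 0 and flags[i]:
--         i -= 1
--     return (i + 1, end)
-- ===== Notes on version B (the rewrite author's own statement) =====
-- stated objective: simpler
-- what changed: Instead of a forward scan that builds a list of all runs and returns its last element, B scans right-to-left, locating the last True index and then the run's left edge, with early exit and no runs list.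
import Mathlib
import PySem

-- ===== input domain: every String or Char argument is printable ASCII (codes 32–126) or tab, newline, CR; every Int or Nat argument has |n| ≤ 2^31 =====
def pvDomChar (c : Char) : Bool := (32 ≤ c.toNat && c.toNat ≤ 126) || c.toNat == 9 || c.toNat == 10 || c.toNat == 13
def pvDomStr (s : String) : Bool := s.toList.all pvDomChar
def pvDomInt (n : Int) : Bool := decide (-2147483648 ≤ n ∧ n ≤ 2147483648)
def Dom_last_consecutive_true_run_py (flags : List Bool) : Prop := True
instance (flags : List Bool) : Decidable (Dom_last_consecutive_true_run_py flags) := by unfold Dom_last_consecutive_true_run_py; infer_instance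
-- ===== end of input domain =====

-- B replaces A's forward scan that builds a list of all runs with a right-to-left
-- scan that finds the last run directly (objective: simpler).


-- ===== PORT A =====
-- inner `while i < n and flags[i]: i += 1` of A (index accesses are guarded
-- in range by the loop condition, so List.getD is exact here)
def pvAInner (flags : List Bool) (i : Nat) : Nat :=
  if i < flags.length ∧ flags.getD i false then pvAInner flags (i + 1) else i
termination_by flags.length - i
decreasing_by omega

theorem pvAInner_ge (flags : List Bool) (i : Nat) : i ≤ pvAInner flags i := by
  unfold pvAInner
  split
  · have := pvAInner_ge flags (i + 1); omega
  · exact le_refl i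
termination_by flags.length - i
decreasing_by omega

theorem pvAInner_gt (flags : List Bool) (i : Nat)
    (h1 : i < flags.length) (h2 : flags.getD i false = true) : i < pvAInner flags i := by
  rw [pvAInner, if_pos ⟨h1, h2⟩]
  have := pvAInner_ge flags (i + 1); omega

-- outer while loop of A, accumulating the runs list
def pvALoop (flags : List Bool) (i : Nat) (runs : List (Int × Int)) : List (Int × Int) :=
  if h : i < flags.length then
    if hf : flags.getD i false = false then pvALoop flags (i + 1) runs
    else pvALoop flags (pvAInner flags i)
        (runs ++ [((i : Int), ((pvAInner flags i : Nat) : Int) - 1)])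
  else runs
termination_by flags.length - i
decreasing_by
  · omega
  · have := pvAInner_gt flags i h (by simpa using hf); omega

def last_consecutive_true_run_py (flags : List Bool) : Option (Int × Int) :=
  (pvALoop flags 0 []).getLast?

-- ===== PORT B =====
-- `while i >= 0 and not flags[i]: i -= 1` scanning down from k-1; returns the
-- last True index below k, or none
def pvBEnd (flags : List Bool) : Nat → Option Nat
  | 0 => none
  | k + 1 => if flags.getD k false then some k else pvBEnd flags k

-- `while i >= 0 and flags[i]: i -= 1`, then start = i + 1
def pvBStart (flags : List Bool) : Nat → Nat
  | 0 => 0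
  | k + 1 => if flags.getD k false then pvBStart flags k else k + 1

def last_consecutive_true_run_py_alt (flags : List Bool) : Option (Int × Int) :=
  match pvBEnd flags flags.length with
  | none => none
  | some e => some ((pvBStart flags e : Int), (e : Int))

-- ===== PRECONDITION & SPEC =====
def Spec_last_consecutive_true_run_py (flags : List Bool) (out : Option (Int × Int)) : Prop := out = last_consecutive_true_run_py_alt flags
instance (flags : List Bool) (out : Option (Int × Int)) : Decidable (Spec_last_consecutive_true_run_py flags out) := by unfold Spec_last_consecutive_true_run_py; infer_instance

-- ===== CLAIM (what is proved, stated in full; the proofs are below) =====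
def Claim_equal_last_consecutive_true_run_py : Prop := ∀ (flags : List Bool), Dom_last_consecutive_true_run_py flags → Spec_last_consecutive_true_run_py flags (last_consecutive_true_run_py flags)

-- ===== LEMMAS AND PROOFS =====

theorem getD_true_lt (flags : List Bool) (m : Nat) (h : flags.getD m false = true) :
    m < flags.length := by
  by_contra hn
  rw [List.getD_eq_default _ _ (by omega)] at h
  exact Bool.false_ne_true h

theorem pvAInner_le (flags : List Bool) (i : Nat) (h : i ≤ flags.length) :
    pvAInner flags i ≤ flags.length := by
  unfold pvAInner
  split
  · exact pvAInner_le flags (i + 1) (by omega)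
  · exact h
termination_by flags.length - i
decreasing_by omega

theorem pvAInner_true (flags : List Bool) (i : Nat) :
    ∀ m, i ≤ m → m < pvAInner flags i → flags.getD m false = true := by
  intro m h1 h2
  rw [pvAInner] at h2
  split at h2
  · rename_i hc
    rcases Nat.eq_or_lt_of_le h1 with rfl | hlt
    · exact hc.2
    · exact pvAInner_true flags (i + 1) m hlt h2
  · omega
termination_by flags.length - i
decreasing_by omega

theorem pvAInner_end (flags : List Bool) (i : Nat) :
    flags.getD (pvAInner flags i) false = false := by
  rw [pvAInner]
  split
  · exact pvAInner_end flags (i + 1)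
  · rename_i hc
    by_cases h1 : i < flags.length
    · simp only [h1, true_and] at hc; simpa using hc
    · rw [List.getD_eq_default _ _ (by omega)]
termination_by flags.length - i
decreasing_by omega

theorem pvBEnd_lt (flags : List Bool) (k e : Nat) (h : pvBEnd flags k = some e) : e < k := by
  induction k with
  | zero => simp [pvBEnd] at h
  | succ k ih =>
    rw [pvBEnd] at h
    split at h
    · cases h; omega
    · have := ih h; omega

theorem pvBEnd_true (flags : List Bool) (k e : Nat) (h : pvBEnd flags k = some e) :
    flags.getD e false = true := by
  induction k with
  | zero => simp [pvBEnd] at h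
  | succ k ih =>
    rw [pvBEnd] at h
    split at h
    · cases h; assumption
    · exact ih h

-- any True index below k is ≤ the index pvBEnd finds, and pvBEnd finds one
theorem pvBEnd_ge (flags : List Bool) (k m : Nat) (hm : m < k)
    (ht : flags.getD m false = true) : ∃ e, pvBEnd flags k = some e ∧ m ≤ e := by
  induction k with
  | zero => omega
  | succ k ih =>
    rw [pvBEnd]
    split
    · exact ⟨k, rfl, by omega⟩
    · rename_i hf
      have hmk : m < k := by
        rcases Nat.lt_succ_iff_lt_or_eq.mp hm with h | h
        · exact h
        · subst h; simp [List.getD] at ht; simp [ht] at hf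
      obtain ⟨e, he, hme⟩ := ih hmk
      exact ⟨e, he, hme⟩

theorem pvBStart_le (flags : List Bool) (k : Nat) : pvBStart flags k ≤ k := by
  induction k with
  | zero => simp [pvBStart]
  | succ k ih =>
    rw [pvBStart]; split
    · omega
    · omega

theorem pvBStart_true (flags : List Bool) (k : Nat) :
    ∀ m, pvBStart flags k ≤ m → m < k → flags.getD m false = true := by
  induction k with
  | zero => omega
  | succ k ih =>
    intro m h1 h2
    rw [pvBStart] at h1
    split at h1
    · rename_i hf
      rcases Nat.lt_succ_iff_lt_or_eq.mp h2 with h | rfl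
      · exact ih m h1 h
      · exact hf
    · omega

theorem pvBStart_min (flags : List Bool) (k i : Nat)
    (h : ∀ m, i ≤ m → m < k → flags.getD m false = true) : pvBStart flags k ≤ i := by
  induction k with
  | zero => simp [pvBStart]
  | succ k ih =>
    rw [pvBStart]
    by_cases hik : i ≤ k
    · rw [if_pos (h k hik (by omega))]
      exact ih fun m h1 h2 => h m h1 (by omega)
    · have := pvBStart_le flags k
      split <;> omega

-- expected value of the remaining computation from position i with accumulator runs
def pvExpect (flags : List Bool) (i : Nat) (runs : List (Int × Int)) : Option (Int × Int) :=
  match pvBEnd flags flags.length with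
  | some e =>
      if i ≤ e then some (((max i (pvBStart flags e) : Nat) : Int), (e : Int))
      else runs.getLast?
  | none => runs.getLast?

theorem pvExpect_some (flags : List Bool) (i : Nat) (runs : List (Int × Int)) (e : Nat)
    (he : pvBEnd flags flags.length = some e) :
    pvExpect flags i runs =
      if i ≤ e then some (((max i (pvBStart flags e) : Nat) : Int), (e : Int))
      else runs.getLast? := by
  unfold pvExpect; rw [he]

theorem pvExpect_none (flags : List Bool) (i : Nat) (runs : List (Int × Int))
    (he : pvBEnd flags flags.length = none) :
    pvExpect flags i runs = runs.getLast? := by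
  unfold pvExpect; rw [he]

-- main invariant: the last run reported from position i onward
theorem pvALoop_last (flags : List Bool) :
    ∀ fuel i runs, flags.length - i ≤ fuel →
    (pvALoop flags i runs).getLast? = pvExpect flags i runs := by
  intro fuel
  induction fuel with
  | zero =>
    intro i runs hfe
    rw [pvALoop, dif_neg (by omega)]
    cases he : pvBEnd flags flags.length with
    | none => rw [pvExpect_none flags i runs he]
    | some e =>
      have := pvBEnd_lt flags _ _ he
      rw [pvExpect_some flags i runs e he, if_neg (by omega)]
  | succ fuel ih =>
    intro i runs hfe
    rw [pvALoop]
    by_cases hi : i < flags.length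
    · rw [dif_pos hi]
      by_cases hf : flags.getD i false = false
      · -- flags[i] is False: skip
        rw [dif_pos hf, ih (i + 1) runs (by omega)]
        cases he : pvBEnd flags flags.length with
        | none => rw [pvExpect_none flags _ runs he, pvExpect_none flags _ runs he]
        | some e =>
          rw [pvExpect_some flags _ runs e he, pvExpect_some flags _ runs e he]
          have het := pvBEnd_true flags _ _ he
          have hne : e ≠ i := fun h => by rw [h, hf] at het; exact Bool.false_ne_true het
          by_cases hie : i ≤ e
          · rw [if_pos (by omega), if_pos hie]
            have hs : i + 1 ≤ pvBStart flags e := by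
              by_contra hc
              have := pvBStart_true flags e i (by omega) (by omega)
              rw [hf] at this; exact Bool.false_ne_true this
            congr 2
            omega
          · rw [if_neg (by omega), if_neg hie]
      · -- flags[i] is True: a run starts at i
        rw [dif_neg hf]
        have hft : flags.getD i false = true := by simpa using hf
        set j := pvAInner flags i with hj
        have hji : i < j := pvAInner_gt flags i hi hft
        have hjn : j ≤ flags.length := pvAInner_le flags i (by omega)
        have hjf : flags.getD j false = false := pvAInner_end flags i
        have hrun : ∀ m, i ≤ m → m < j → flags.getD m false = true :=
          pvAInner_true flags i
        obtain ⟨e, he, hie⟩ := pvBEnd_ge flags flags.length i hi hft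
        rw [ih j (runs ++ [((i : Int), (j : Int) - 1)]) (by omega)]
        rw [pvExpect_some flags j _ e he, pvExpect_some flags i runs e he]
        have het := pvBEnd_true flags _ _ he
        have heln := pvBEnd_lt flags _ _ he
        by_cases hje : j ≤ e
        · -- the last run lies strictly to the right of this one
          have hjlt : j < e := by
            rcases Nat.eq_or_lt_of_le hje with rfl | h
            · rw [hjf] at het; exact absurd het Bool.false_ne_true
            · exact h
          rw [if_pos hje, if_pos (by omega)]
          have hs : j + 1 ≤ pvBStart flags e := by
            by_contra hc
            have := pvBStart_true flags e j (by omega) hjlt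
            rw [hjf] at this; exact Bool.false_ne_true this
          congr 2
          omega
        · -- this is the last run: e = j - 1
          have hej : e = j - 1 := by
            have : j - 1 ≤ e := by
              obtain ⟨e', he', h1⟩ := pvBEnd_ge flags flags.length (j - 1)
                (by have := getD_true_lt flags (j - 1) (hrun (j - 1) (by omega) (by omega)); omega)
                (hrun (j - 1) (by omega) (by omega))
              rw [he] at he'; cases he'; exact h1
            omega
          rw [if_neg (by omega), if_pos hie]
          have hs : pvBStart flags e ≤ i :=
            pvBStart_min flags e i (fun m h1 h2 => hrun m h1 (by omega))
          simp only [List.getLast?_append, List.getLast?_singleton]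
          have h1 : (max i (pvBStart flags e)) = i := by omega
          have h2 : ((j : Int) - 1) = ((e : Nat) : Int) := by omega
          rw [h1, h2, Option.some_or]
    · rw [dif_neg hi]
      cases he : pvBEnd flags flags.length with
      | none => rw [pvExpect_none flags i runs he]
      | some e =>
        have := pvBEnd_lt flags _ _ he
        rw [pvExpect_some flags i runs e he, if_neg (by omega)]

-- ===== VERDICT (by name: the statement is the Claim_ definition above) =====
theorem last_consecutive_true_run_py_spec : Claim_equal_last_consecutive_true_run_py := by
  intro flags _
  unfold Spec_last_consecutive_true_run_py last_consecutive_true_run_py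
    last_consecutive_true_run_py_alt
  rw [pvALoop_last flags flags.length 0 [] (by omega)]
  cases he : pvBEnd flags flags.length with
  | none => rw [pvExpect_none flags 0 [] he]; rfl
  | some e =>
    rw [pvExpect_some flags 0 [] e he, if_pos (by omega)]
    simp
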